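-- pv_equiv track=rewrite | github.com/livlikwav/ProblemSolving | Programmers/2019카카오겨울인턴십/불량사용자.py | solution
-- ===== SOURCE A (Python) =====
-- def solution(user_id, banned_id):
--
--     # 문자열 패턴 매칭기
--     def match(user: str, banned: str) -> bool:
--         # 먼저 문자열 길이가 같아야함
--         if len(user) != len(banned):
--             return False
--
--         # 문자 하나씩 순서대로 비교
--         for i in range(len(banned)):
--             ch = banned[i]
--             if ch != '*':
--                 # 해당 문자 다를경우 바로 False
--                 if ch != user[i]:
--                     return False
--         # 모든 조건 만족시 True
--         return True
--
--     # 하나의 banned ID에 대해서 userID후보 list 만듬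
--     def get_cand(users: list, bans: list) -> list:
--         result = []
--
--         for banned in bans:
--             temp = []
--
--             for user in users:
--                 if match(user, banned):
--                     temp.append(user)
--
--             result.append((banned, temp))
--
--         return result
--
--     data = get_cand(user_id, banned_id)
--
--     # 불량 아이디 갯수
--     length = len(banned_id)
--
--     # 각 후보 아이디 갯수 담은 배열 만들기
--     num_of_cand = []
--     for i in range(length):
--         num_of_cand.append(len(data[i][1]))
--
--     result = []
--
--     def dfs(temp: list, level: int):
--         if level == length:
--             # 현재 temp 리스트를 set으로 변환
--             temp = set(temp)
--             # set의 길이가 불량 사용자 갯수와 맞는지 확인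
--             if len(temp) == len(banned_id):
--                 # 아마 중복되는 조합이 result에 있는지 확인
--                 if temp not in result:
--                     result.append(temp)
--             return
--
--         for i in range(num_of_cand[level]):
--             next = temp + [data[level][1][i]]
--             dfs(next, level + 1)
--
--     # dfs 수행
--     start = 0
--     for i in range(num_of_cand[start]):
--         # 첫번째 원소의 각 경우의 수로 dfs를 시작함
--         dfs([data[start][1][i]], 1)
--
--     answer = len(result)
--     return answer
-- ===== SOURCE B (Python) =====
-- def solution(user_id, banned_id):
--     def match(user, banned):
--         return len(user) == len(banned) and all(
--             b == '*' or b == u for u, b in zip(user, banned))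
--
--     cands = [[u for u in user_id if match(u, b)] for b in banned_id]
--     # build the full candidate product iteratively (flat list of tuples)
--     tuples = [[]]
--     for cs in cands:
--         tuples = [t + [c] for t in tuples for c in cs]
--     n = len(banned_id)
--     results = set()
--     for t in tuples:
--         fs = frozenset(t)
--         if len(fs) == n:
--             results.add(fs)
--     return len(results)
-- ===== Notes on version B (the rewrite author's own statement) =====
-- stated objective: alternative
-- what changed: Replaces the level-indexed recursive dfs (with list-scan dedup of result sets) by a flat iterative construction of the full candidate product followed by one pass that dedups via a set of frozensets.
import Mathlib
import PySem

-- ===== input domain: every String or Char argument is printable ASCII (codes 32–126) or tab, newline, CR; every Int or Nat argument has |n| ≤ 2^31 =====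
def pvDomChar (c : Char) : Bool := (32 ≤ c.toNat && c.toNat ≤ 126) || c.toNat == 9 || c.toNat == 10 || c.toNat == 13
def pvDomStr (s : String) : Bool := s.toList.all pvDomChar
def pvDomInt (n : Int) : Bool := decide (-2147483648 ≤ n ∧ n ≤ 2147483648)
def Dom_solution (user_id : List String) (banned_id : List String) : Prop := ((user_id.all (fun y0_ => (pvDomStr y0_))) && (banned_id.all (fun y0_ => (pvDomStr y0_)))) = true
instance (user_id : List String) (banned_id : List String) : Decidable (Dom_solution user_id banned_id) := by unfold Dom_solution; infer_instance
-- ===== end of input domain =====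

-- B builds the candidate product iteratively and dedups with a set of frozensets,
-- instead of A's level-indexed recursion with a list-scan dedup; return values agree on Pre_.


-- Python set equality (same elements, both ways); used wherever the Pythons compare sets.
def pvSetEq (a b : List String) : Bool := a.all (fun x => b.contains x) && b.all (fun x => a.contains x)

-- ===== PORT A =====
-- match(user, banned): length check, then char-by-char comparison with '*' wildcard
def pvMatchGoA : List Char → List Char → Bool
  | u :: us, b :: bs => if b ≠ '*' then (if b ≠ u then false else pvMatchGoA us bs) else pvMatchGoA us bs
  | _, _ => true

def pvMatchA (user banned : String) : Bool :=
  if user.toList.length ≠ banned.toList.length then false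
  else pvMatchGoA user.toList banned.toList

-- get_cand(users, bans)
def pvGetCand (users bans : List String) : List (String × List String) :=
  bans.foldl (fun result banned =>
    result ++ [(banned, users.foldl (fun temp user => if pvMatchA user banned then temp ++ [user] else temp) [])]) []

-- dfs base case: temp = set(temp); if len == n and not in result (set equality): append
def pvBaseA (n : Nat) (result : List (List String)) (temp : List String) : List (List String) :=
  let s : PySem.Set String := PySem.Set.ofList temp
  if s.length == n && !(result.any (fun r => pvSetEq s r)) then result ++ [s] else result

-- dfs(temp, level): the level index is replaced by the list of remaining candidate lists
def pvDfsA (n : Nat) (temp : List String) (rest : List (List String)) (result : List (List String)) : List (List String) :=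
  match rest with
  | [] => pvBaseA n result temp
  | cs :: rest' => cs.foldl (fun acc c => pvDfsA n (temp ++ [c]) rest' acc) result

def solution (user_id : List String) (banned_id : List String) : Int :=
  -- data := get_cand(user_id, banned_id); the per-level candidate lists data[i][1]:
  match (pvGetCand user_id banned_id).map (fun p => p.2) with
  | [] => 0   -- Python raises IndexError here (banned_id = []); excluded by Pre_solution
  | cs0 :: rest =>
      ((cs0.foldl (fun acc c => pvDfsA banned_id.length [c] rest acc) []).length : Int)

-- ===== PORT B =====
def pvMatchB (user banned : String) : Bool :=
  user.toList.length == banned.toList.length &&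
    (user.toList.zip banned.toList).all (fun p => p.2 == '*' || p.2 == p.1)

-- tuples = [t + [c] for t in tuples for c in cs]
def pvProdStep (tuples : List (List String)) (cs : List String) : List (List String) :=
  tuples.flatMap (fun t => cs.map (fun c => t ++ [c]))

-- fs = frozenset(t); if len(fs) == n: results.add(fs).  The Python set of frozensets is
-- represented as a list of PySem.Set String, distinct up to set equality (exact for len()).
def pvAddSet (n : Nat) (result : List (List String)) (t : List String) : List (List String) :=
  let fs : PySem.Set String := PySem.Set.ofList t
  if fs.length == n then (if result.any (fun r => pvSetEq fs r) then result else result ++ [fs]) else result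

def solution_alt (user_id : List String) (banned_id : List String) : Int :=
  (((((banned_id.map (fun b => user_id.filter (fun u => pvMatchB u b))).foldl pvProdStep [[]]).foldl (pvAddSet banned_id.length) []).length : Int))

-- ===== PRECONDITION & SPEC =====
-- Pre_ excludes only banned_id = [], on which A raises IndexError (num_of_cand[0]).
def Pre_solution (user_id : List String) (banned_id : List String) : Prop := banned_id ≠ []
instance (user_id : List String) (banned_id : List String) : Decidable (Pre_solution user_id banned_id) := by unfold Pre_solution; infer_instance
def pvWitness_solution : List String × List String := (["frodo", "crodo"], ["*rodo"])

def Spec_solution (user_id : List String) (banned_id : List String) (out : Int) : Prop := out = solution_alt user_id banned_id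
instance (user_id : List String) (banned_id : List String) (out : Int) : Decidable (Spec_solution user_id banned_id out) := by unfold Spec_solution; infer_instance

-- ===== CLAIM (what is proved, stated in full; the proofs are below) =====
def Claim_equal_solution : Prop := ∀ (user_id : List String) (banned_id : List String), Dom_solution user_id banned_id → Pre_solution user_id banned_id → Spec_solution user_id banned_id (solution user_id banned_id)

-- ===== LEMMAS AND PROOFS =====

theorem pvMatchGo_eq (us : List Char) : ∀ bs, pvMatchGoA us bs = (us.zip bs).all (fun p => p.2 == '*' || p.2 == p.1) := by
  induction us with
  | nil => intro bs; cases bs <;> simp [pvMatchGoA]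
  | cons u us ih =>
    intro bs
    cases bs with
    | nil => simp [pvMatchGoA]
    | cons b bs =>
      simp only [pvMatchGoA, List.zip_cons_cons, List.all_cons]
      by_cases h : b = '*'
      · simp [h, ih]
      · by_cases h2 : b = u <;> simp [h, h2, ih]

theorem pvMatch_eq (u b : String) : pvMatchA u b = pvMatchB u b := by
  unfold pvMatchA pvMatchB
  by_cases h : u.toList.length = b.toList.length
  · simp [h, pvMatchGo_eq]
  · have h' : ¬ u.length = b.length := by simpa using h
    simp [h']

theorem pvCands_eq (users bans : List String) :
    (pvGetCand users bans).map (fun p => p.2) = bans.map (fun b => users.filter (fun u => pvMatchB u b)) := by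
  unfold pvGetCand
  rw [PySem.List.foldl_append_singleton_eq_map]
  simp [PySem.List.foldl_append_if_eq_filter, pvMatch_eq]

theorem pvBase_eq (n : Nat) (r : List (List String)) (t : List String) :
    pvBaseA n r t = pvAddSet n r t := by
  unfold pvBaseA pvAddSet
  by_cases h1 : (PySem.Set.ofList t : List String).length == n <;>
    by_cases h2 : r.any (fun x => pvSetEq (PySem.Set.ofList t) x) <;> simp [h1, h2]

theorem pvProdStep_nil (cs : List String) : pvProdStep [] cs = [] := by simp [pvProdStep]

theorem pvFoldProd_nil : ∀ rest : List (List String), rest.foldl pvProdStep [] = [] := by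
  intro rest
  induction rest with
  | nil => rfl
  | cons cs rest ih => simp [pvProdStep_nil, ih]

theorem pvFoldProd_append (rest : List (List String)) :
    ∀ a b : List (List String), rest.foldl pvProdStep (a ++ b) = rest.foldl pvProdStep a ++ rest.foldl pvProdStep b := by
  induction rest with
  | nil => intro a b; rfl
  | cons cs rest ih =>
    intro a b
    simp only [List.foldl_cons]
    rw [show pvProdStep (a ++ b) cs = pvProdStep a cs ++ pvProdStep b cs by simp [pvProdStep], ih]

-- splitting a fold of folds over per-seed products into one fold over the product of all seeds
theorem pvFoldSplit (n : Nat) (rest : List (List String)) (f : String → List String) :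
    ∀ (cs : List String) (result : List (List String)),
      cs.foldl (fun acc c => (rest.foldl pvProdStep [f c]).foldl (pvAddSet n) acc) result
        = (rest.foldl pvProdStep (cs.map f)).foldl (pvAddSet n) result := by
  intro cs
  induction cs with
  | nil => intro result; simp [pvFoldProd_nil]
  | cons c cs ih =>
    intro result
    simp only [List.foldl_cons, List.map_cons]
    rw [show (f c :: cs.map f) = [f c] ++ cs.map f from rfl, pvFoldProd_append, List.foldl_append, ih]

theorem pvDfs_eq (n : Nat) : ∀ (rest : List (List String)) (temp : List String) (result : List (List String)),
    pvDfsA n temp rest result = (rest.foldl pvProdStep [temp]).foldl (pvAddSet n) result := by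
  intro rest
  induction rest with
  | nil => intro temp result; simp [pvDfsA, pvBase_eq]
  | cons cs rest ih =>
    intro temp result
    simp only [pvDfsA, ih]
    rw [pvFoldSplit n rest (fun c => temp ++ [c]) cs result]
    simp only [List.foldl_cons]
    congr 1
    simp [pvProdStep]

-- ===== VERDICT (by name: the statement is the Claim_ definition above) =====
theorem solution_spec : Claim_equal_solution := by
  intro user_id banned_id _ hpre
  unfold Spec_solution solution solution_alt
  rw [pvCands_eq]
  cases banned_id with
  | nil => exact absurd rfl hpre
  | cons b0 bans =>
    simp only [List.map_cons, List.foldl_cons]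
    have htop : ∀ (cs0 : List String) (rest : List (List String)),
        cs0.foldl (fun acc c => pvDfsA (b0 :: bans).length [c] rest acc) []
          = (rest.foldl pvProdStep (pvProdStep [[]] cs0)).foldl (pvAddSet (b0 :: bans).length) [] := by
      intro cs0 rest
      have := pvFoldSplit (b0 :: bans).length rest (fun c => [c]) cs0 []
      simp only [pvDfs_eq] at *
      rw [this]
      congr 2
      simp [pvProdStep]
    rw [htop]
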